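-- pv_equiv track=rewrite | github.com/MGXlab/CAT_pack | CAT_pack/tax.py | convert_to_official_names
-- ===== SOURCE A (Python) =====
-- def convert_to_official_names(lineage, taxid2rank, taxid2name, scores=None):
--     official_ranks = ["superkingdom", "phylum", "class", "order", "family",
--                       "genus", "species"]
--     lineage_ranks = [taxid2rank[taxid.rstrip("*")] for taxid in lineage]
--
--     official_names = ["no support"] * 7
--
--     for (i, rank) in enumerate(official_ranks):
--         if rank in lineage_ranks:
--             index = lineage_ranks.index(rank)
--
--             taxid = lineage[index]
--
--             if "*" in taxid:
--                 taxid = taxid.rstrip("*")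
--
--                 starred = True
--             else:
--                 starred = False
--
--             name = taxid2name[taxid]
--
--             if scores is not None:
--                 if starred:
--                     official_names[i] = "{0}*: {1}".format(name, scores[index])
--                 else:
--                     official_names[i] = "{0}: {1}".format(name, scores[index])
--             else:
--                 if starred:
--                     official_names[i] = "{0}*".format(name)
--                 else:
--                     official_names[i] = name
--
--     # Fill the official lineage with NAs if a lower classification is present.
--     index_lowest_classification = 0
--     for (i, name) in enumerate(official_names):
--         if name != "no support":
--             index_lowest_classification = i
--
--     for i in range(index_lowest_classification):
--         if official_names[i] == "no support":
--             official_names[i] = "NA"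
--
--     return official_names
-- ===== SOURCE B (Python) =====
-- def convert_to_official_names(lineage, taxid2rank, taxid2name, scores=None):
--     official_ranks = ["superkingdom", "phylum", "class", "order", "family",
--                       "genus", "species"]
--     lineage_ranks = [taxid2rank[taxid.rstrip("*")] for taxid in lineage]
--
--     pos = {rank: j for j, rank in enumerate(official_ranks)}
--
--     # Walk the lineage BACKWARDS so earlier entries overwrite later ones:
--     # afterwards first[j] is the first lineage index carrying official rank j.
--     first = [None] * 7
--     for index, rank in reversed(list(enumerate(lineage_ranks))):
--         j = pos.get(rank)
--         if j is not None:
--             first[j] = index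
--
--     # Build the output back to front; `seen` says whether a supported slot
--     # exists to the right, which is exactly when "no support" becomes "NA".
--     result = []
--     seen = False
--     for j in range(6, -1, -1):
--         index = first[j]
--         if index is None:
--             name = "no support"
--         else:
--             taxid = lineage[index]
--             name = taxid2name[taxid.rstrip("*")]
--             if "*" in taxid:
--                 name += "*"
--             if scores is not None:
--                 name = "{0}: {1}".format(name, scores[index])
--         if name != "no support":
--             seen = True
--             result.append(name)
--         else:
--             result.append("NA" if seen else "no support")
--     result.reverse()
--     return result
-- ===== Notes on version B (the rewrite author's own statement) =====
-- stated objective: alternative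
-- what changed: B replaces A's per-rank forward scans (7x `in`+`.index` over lineage_ranks) and A's two trailing fix-up loops by two single passes: a BACKWARD pass over the lineage that overwrites a 7-slot first-occurrence index table (so the earliest occurrence wins), and one back-to-front construction of the output with a `seen` flag that turns 'no support' into 'NA' exactly below the lowest classification, instead of first locating the lowest classification and then re-walking the list.
import Mathlib
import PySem

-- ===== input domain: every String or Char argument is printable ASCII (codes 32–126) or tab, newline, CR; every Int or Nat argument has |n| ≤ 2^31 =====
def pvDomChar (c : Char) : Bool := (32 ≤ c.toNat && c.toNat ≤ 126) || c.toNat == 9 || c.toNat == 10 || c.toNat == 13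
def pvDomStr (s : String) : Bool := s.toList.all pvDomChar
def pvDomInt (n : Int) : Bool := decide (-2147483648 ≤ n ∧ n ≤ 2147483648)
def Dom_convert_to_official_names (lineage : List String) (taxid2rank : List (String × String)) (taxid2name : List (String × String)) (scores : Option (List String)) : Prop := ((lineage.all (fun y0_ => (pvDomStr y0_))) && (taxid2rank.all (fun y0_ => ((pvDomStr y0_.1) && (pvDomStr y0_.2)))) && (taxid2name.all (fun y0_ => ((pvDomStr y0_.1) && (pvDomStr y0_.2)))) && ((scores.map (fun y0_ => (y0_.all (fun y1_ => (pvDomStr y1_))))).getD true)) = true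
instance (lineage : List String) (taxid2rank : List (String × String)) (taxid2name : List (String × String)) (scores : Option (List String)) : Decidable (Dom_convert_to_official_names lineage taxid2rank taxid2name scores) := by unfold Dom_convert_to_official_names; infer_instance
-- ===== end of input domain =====

-- B replaces A's seven forward `in`/`.index` scans and A's two trailing fix-up loops by a
-- BACKWARD pass recording each official rank's first lineage index in a 7-slot table, then
-- ONE back-to-front construction of the output with a `seen` flag (objective: alternative).

-- exact port of s.rstrip("*"): drop the trailing run of '*' characters
def pvStripStar (s : String) : String :=
  String.ofList ((s.toList.reverse.dropWhile (fun c => c == '*')).reverse)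

def pvOfficialRanks : List String :=
  ["superkingdom", "phylum", "class", "order", "family", "genus", "species"]

-- ===== PORT A =====
-- A's trailing code: find the last filled slot, then overwrite earlier "no support" with "NA"
def pvNaFill (official_names : List String) : List String :=
  let ilc := (PySem.List.enumerate official_names).foldl
    (fun acc p => if p.2 ≠ "no support" then p.1 else acc) 0
  (PySem.List.pyRange 0 ilc 1).foldl
    (fun arr i => if (PySem.List.pyGet? arr i).getD "" = "no support" then arr.set i.toNat "NA" else arr)
    official_names

-- the body of A's `for (i, rank) in enumerate(official_ranks)` loop
def pvAStep (lineage_ranks lineage : List String) (nameD : PySem.Dict String String) (scores : Option (List String)) (official_names : List String) (p : Int × String) : List String :=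
  if p.2 ∈ lineage_ranks then
    let index := (PySem.List.index? lineage_ranks p.2).getD 0
    let taxid := (PySem.List.pyGet? lineage (index : Int)).getD ""
    let ts : String × Bool :=
      if PySem.Str.isIn "*" taxid then (pvStripStar taxid, true) else (taxid, false)
    let name := nameD.getD ts.1 ""
    let v := match scores with
      | some sc =>
        if ts.2 then name ++ "*: " ++ ((PySem.List.pyGet? sc (index : Int)).getD "")
        else name ++ ": " ++ ((PySem.List.pyGet? sc (index : Int)).getD "")
      | none => if ts.2 then name ++ "*" else name
    official_names.set p.1.toNat v
  else official_names

def convert_to_official_names (lineage : List String) (taxid2rank : List (String × String)) (taxid2name : List (String × String)) (scores : Option (List String)) : List String :=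
  let lineage_ranks := lineage.map (fun taxid => (PySem.Dict.ofList taxid2rank).getD (pvStripStar taxid) "")
  let official :=
    (PySem.List.enumerate pvOfficialRanks).foldl
      (pvAStep lineage_ranks lineage (PySem.Dict.ofList taxid2name) scores)
      (List.replicate 7 "no support")
  pvNaFill official

-- ===== PORT B =====
-- {rank: j for j, rank in enumerate(official_ranks)}
def pvPosDict : PySem.Dict String Int :=
  PySem.Dict.ofList ((PySem.List.enumerate pvOfficialRanks).map (fun p => (p.2, p.1)))

-- body of Source B's backward loop: j = pos.get(rank); if j is not None: first[j] = index
def pvBStep (first : List (Option Int)) (p : Int × String) : List (Option Int) :=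
  match pvPosDict.get? p.2 with
  | some j => first.set j.toNat (some p.1)
  | none => first

-- the `else` branch of Source B's output loop: format the name found at lineage position `index`
def pvFmtB (nameD : PySem.Dict String String) (scores : Option (List String)) (lineage : List String) (index : Int) : String :=
  let taxid := (PySem.List.pyGet? lineage index).getD ""
  let name := nameD.getD (pvStripStar taxid) ""
  let name := if PySem.Str.isIn "*" taxid then name ++ "*" else name
  match scores with
  | some sc => name ++ ": " ++ ((PySem.List.pyGet? sc index).getD "")
  | none => name

-- `name = "no support" if index is None else <formatted name>`
def pvNameOf (nameD : PySem.Dict String String) (scores : Option (List String)) (lineage : List String) (o : Option Int) : String :=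
  match o with
  | none => "no support"
  | some index => pvFmtB nameD scores lineage index

def convert_to_official_names_alt (lineage : List String) (taxid2rank : List (String × String)) (taxid2name : List (String × String)) (scores : Option (List String)) : List String :=
  let lineage_ranks := lineage.map (fun taxid => (PySem.Dict.ofList taxid2rank).getD (pvStripStar taxid) "")
  let first := ((PySem.List.enumerate lineage_ranks).reverse).foldl pvBStep (List.replicate 7 none)
  let nameD := PySem.Dict.ofList taxid2name
  let st := (PySem.List.pyRange 6 (-1) (-1)).foldl
    (fun (st : List String × Bool) j =>
      let name := pvNameOf nameD scores lineage (first.getD j.toNat none)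
      if name ≠ "no support" then (st.1 ++ [name], true)
      else (st.1 ++ [if st.2 then "NA" else "no support"], st.2))
    ([], false)
  st.1.reverse

-- ===== PRECONDITION & SPEC =====
-- Pre_ excludes exactly the inputs on which the Python raises: a KeyError when a
-- star-stripped lineage taxid is missing from taxid2rank, and, at the FIRST lineage
-- position carrying an official rank, a KeyError on taxid2name or an IndexError on scores.
def Pre_convert_to_official_names (lineage : List String) (taxid2rank : List (String × String)) (taxid2name : List (String × String)) (scores : Option (List String)) : Prop :=
  (∀ t ∈ lineage, ((PySem.Dict.ofList taxid2rank).get? (pvStripStar t)).isSome = true) ∧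
  (∀ i < lineage.length,
    (PySem.Dict.ofList taxid2rank).getD (pvStripStar (lineage.getD i "")) "" ∈ pvOfficialRanks →
    (∀ j < i, (PySem.Dict.ofList taxid2rank).getD (pvStripStar (lineage.getD j "")) "" ≠
              (PySem.Dict.ofList taxid2rank).getD (pvStripStar (lineage.getD i "")) "") →
    (((PySem.Dict.ofList taxid2name).get? (pvStripStar (lineage.getD i ""))).isSome = true ∧
     ((scores.map (fun sc => decide (i < sc.length))).getD true) = true))
instance (lineage : List String) (taxid2rank : List (String × String)) (taxid2name : List (String × String)) (scores : Option (List String)) : Decidable (Pre_convert_to_official_names lineage taxid2rank taxid2name scores) := by unfold Pre_convert_to_official_names; infer_instance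

def pvWitness_convert_to_official_names : List String × (List (String × String)) × (List (String × String)) × Option (List String) :=
  (["1", "2*"], [("1", "superkingdom"), ("2", "species")], [("1", "Bacteria"), ("2", "Ecoli")], some ["0.9", "0.8"])

def Spec_convert_to_official_names (lineage : List String) (taxid2rank : List (String × String)) (taxid2name : List (String × String)) (scores : Option (List String)) (out : List String) : Prop := out = convert_to_official_names_alt lineage taxid2rank taxid2name scores
instance (lineage : List String) (taxid2rank : List (String × String)) (taxid2name : List (String × String)) (scores : Option (List String)) (out : List String) : Decidable (Spec_convert_to_official_names lineage taxid2rank taxid2name scores out) := by unfold Spec_convert_to_official_names; infer_instance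

-- ===== CLAIM (what is proved, stated in full; the proofs are below) =====
def Claim_equal_convert_to_official_names : Prop := ∀ (lineage : List String) (taxid2rank : List (String × String)) (taxid2name : List (String × String)) (scores : Option (List String)), Dom_convert_to_official_names lineage taxid2rank taxid2name scores → Pre_convert_to_official_names lineage taxid2rank taxid2name scores → Spec_convert_to_official_names lineage taxid2rank taxid2name scores (convert_to_official_names lineage taxid2rank taxid2name scores)

-- ===== LEMMAS AND PROOFS =====

-- the value A's loop writes for an official rank r (A's loop body with the slot write removed)
def pvAG (lineage_ranks lineage : List String) (nameD : PySem.Dict String String) (scores : Option (List String)) (r : String) : String :=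
  let index := (PySem.List.index? lineage_ranks r).getD 0
  let taxid := (PySem.List.pyGet? lineage (index : Int)).getD ""
  let ts : String × Bool :=
    if PySem.Str.isIn "*" taxid then (pvStripStar taxid, true) else (taxid, false)
  let name := nameD.getD ts.1 ""
  match scores with
  | some sc =>
    if ts.2 then name ++ "*: " ++ ((PySem.List.pyGet? sc (index : Int)).getD "")
    else name ++ ": " ++ ((PySem.List.pyGet? sc (index : Int)).getD "")
  | none => if ts.2 then name ++ "*" else name

theorem pvStripStar_of_not_isIn (t : String) (h : PySem.Str.isIn "*" t = false) :
    pvStripStar t = t := by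
  have h1 : ¬ (String.toList "*" <:+: t.toList) := by
    rw [← PySem.Chars.isIn_eq_false_iff]
    simpa using h
  have h2 : '*' ∉ t.toList := by
    intro hm
    obtain ⟨s1, s2, hs⟩ := List.append_of_mem hm
    exact h1 ⟨s1, s2, by simpa using hs.symm⟩
  cases hrev : t.toList.reverse with
  | nil =>
    have h0 : t.toList = [] := by simpa using congrArg List.reverse hrev
    have : pvStripStar t = String.ofList [] := by simp [pvStripStar, h0]
    rw [this, ← String.ofList_toList (s := t), h0]
  | cons a l =>
    have ha : a ∈ t.toList := by
      rw [← List.mem_reverse, hrev]; exact List.mem_cons_self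
    have ha' : (a == '*') = false := by
      simp only [beq_eq_false_iff_ne, ne_eq]
      intro hae; exact h2 (hae ▸ ha)
    calc pvStripStar t
        = String.ofList ((a :: l).reverse) := by
          simp [pvStripStar, hrev, ha']
      _ = t := by rw [← hrev]; simp [String.ofList_toList]

theorem pvAStep_eq (lr lin : List String) (nameD : PySem.Dict String String) (scores : Option (List String)) :
    pvAStep lr lin nameD scores
      = fun a p => if p.2 ∈ lr then a.set p.1.toNat (pvAG lr lin nameD scores p.2) else a := by
  funext a p
  by_cases h : p.2 ∈ lr <;> simp [pvAStep, pvAG, h]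

-- the generic shape of A's loop: the k-th iteration writes slot k, so the fold is a map
theorem pvFoldlEnumerateSet (cond : String → Prop) [DecidablePred cond] (g : String → String) :
    ∀ (rs : List String) (arr0 : List String),
      (PySem.List.enumerate rs (arr0.length : Int)).foldl
        (fun a p => if cond p.2 then a.set p.1.toNat (g p.2) else a)
        (arr0 ++ List.replicate rs.length "no support")
      = arr0 ++ rs.map (fun r => if cond r then g r else "no support") := by
  intro rs
  induction rs with
  | nil => intro arr0; simp [PySem.List.enumerate]
  | cons r rs ih =>
    intro arr0
    rw [PySem.List.enumerate_cons, List.foldl_cons]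
    have hx : (if cond ((arr0.length : Int), r).2 then
          (arr0 ++ List.replicate (r :: rs).length "no support").set ((arr0.length : Int), r).1.toNat (g ((arr0.length : Int), r).2)
        else arr0 ++ List.replicate (r :: rs).length "no support")
        = (arr0 ++ [if cond r then g r else "no support"]) ++ List.replicate rs.length "no support" := by
      by_cases hc : cond r <;>
        simp [hc, List.replicate_succ, List.append_assoc]
    rw [hx]
    have hs : ((arr0.length : Int) + 1) = (((arr0 ++ [if cond r then g r else "no support"]).length : Nat) : Int) := by
      simp
    rw [hs, ih]
    simp [List.append_assoc]

theorem pvAfold (lr lin : List String) (nameD : PySem.Dict String String) (scores : Option (List String)) :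
    (PySem.List.enumerate pvOfficialRanks).foldl (pvAStep lr lin nameD scores) (List.replicate 7 "no support")
    = pvOfficialRanks.map (fun r => if r ∈ lr then pvAG lr lin nameD scores r else "no support") := by
  have h := pvFoldlEnumerateSet (fun r => r ∈ lr) (pvAG lr lin nameD scores) pvOfficialRanks []
  have hlen : pvOfficialRanks.length = 7 := rfl
  rw [hlen] at h
  simp only [List.nil_append, List.length_nil, Nat.cast_zero] at h
  rw [pvAStep_eq]
  exact h

-- first-occurrence update: what one backward step leaves in slot r_j
def pvU (lr : List String) (k : Nat) (r : String) (o : Option Int) : Option Int :=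
  match PySem.List.index? lr r with
  | some i => some (((k + i : Nat)) : Int)
  | none => o

theorem pvU_cons_self (rest : List String) (k : Nat) (r : String) (o : Option Int) :
    pvU (r :: rest) k r o = some (k : Int) := by
  unfold pvU
  rw [PySem.List.index?_cons_self]
  simp

theorem pvU_cons_ne (rest : List String) (k : Nat) (r rj : String) (o : Option Int) (h : r ≠ rj) :
    pvU (r :: rest) k rj o = pvU rest (k + 1) rj o := by
  unfold pvU
  rw [PySem.List.index?_cons_of_ne rest h]
  cases PySem.List.index? rest rj with
  | none => rfl
  | some i =>
    simp only [Option.map_some, Option.some.injEq]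
    congr 1
    omega

theorem pvPosDict_none (r : String) (h0 : r ≠ "superkingdom") (h1 : r ≠ "phylum") (h2 : r ≠ "class") (h3 : r ≠ "order") (h4 : r ≠ "family") (h5 : r ≠ "genus") (h6 : r ≠ "species") : pvPosDict.get? r = none := by
  have hm : pvPosDict = PySem.Dict.mk [("superkingdom", 0), ("phylum", 1), ("class", 2), ("order", 3), ("family", 4), ("genus", 5), ("species", 6)] := by decide
  rw [hm]
  simp [PySem.Dict.get?, h0, h1, h2, h3, h4, h5, h6, Ne.symm]

theorem pvFirstFold (lr : List String) : ∀ (k : Nat) (o0 o1 o2 o3 o4 o5 o6 : Option Int),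
    (PySem.List.enumerate lr (k : Int)).foldr (fun p first => pvBStep first p) [o0, o1, o2, o3, o4, o5, o6]
    = [pvU lr k "superkingdom" o0, pvU lr k "phylum" o1, pvU lr k "class" o2, pvU lr k "order" o3,
       pvU lr k "family" o4, pvU lr k "genus" o5, pvU lr k "species" o6] := by
  induction lr with
  | nil =>
    intro k o0 o1 o2 o3 o4 o5 o6
    simp [PySem.List.enumerate_nil, pvU]
  | cons r rest ih =>
    intro k o0 o1 o2 o3 o4 o5 o6
    rw [PySem.List.enumerate_cons, List.foldr_cons]
    have hk : ((k : Int) + 1) = ((k + 1 : Nat) : Int) := by push_cast; ring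
    rw [hk, ih (k + 1) o0 o1 o2 o3 o4 o5 o6]
    by_cases h0 : r = "superkingdom"
    · subst h0
      have hp : pvPosDict.get? "superkingdom" = some 0 := by decide
      simp only [pvBStep, hp]
      rw [pvU_cons_self rest k "superkingdom" o0, pvU_cons_ne rest k "superkingdom" "phylum" o1 (by decide), pvU_cons_ne rest k "superkingdom" "class" o2 (by decide), pvU_cons_ne rest k "superkingdom" "order" o3 (by decide), pvU_cons_ne rest k "superkingdom" "family" o4 (by decide), pvU_cons_ne rest k "superkingdom" "genus" o5 (by decide), pvU_cons_ne rest k "superkingdom" "species" o6 (by decide)]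
      rfl
    by_cases h1 : r = "phylum"
    · subst h1
      have hp : pvPosDict.get? "phylum" = some 1 := by decide
      simp only [pvBStep, hp]
      rw [pvU_cons_ne rest k "phylum" "superkingdom" o0 (by decide), pvU_cons_self rest k "phylum" o1, pvU_cons_ne rest k "phylum" "class" o2 (by decide), pvU_cons_ne rest k "phylum" "order" o3 (by decide), pvU_cons_ne rest k "phylum" "family" o4 (by decide), pvU_cons_ne rest k "phylum" "genus" o5 (by decide), pvU_cons_ne rest k "phylum" "species" o6 (by decide)]
      rfl
    by_cases h2 : r = "class"
    · subst h2
      have hp : pvPosDict.get? "class" = some 2 := by decide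
      simp only [pvBStep, hp]
      rw [pvU_cons_ne rest k "class" "superkingdom" o0 (by decide), pvU_cons_ne rest k "class" "phylum" o1 (by decide), pvU_cons_self rest k "class" o2, pvU_cons_ne rest k "class" "order" o3 (by decide), pvU_cons_ne rest k "class" "family" o4 (by decide), pvU_cons_ne rest k "class" "genus" o5 (by decide), pvU_cons_ne rest k "class" "species" o6 (by decide)]
      rfl
    by_cases h3 : r = "order"
    · subst h3
      have hp : pvPosDict.get? "order" = some 3 := by decide
      simp only [pvBStep, hp]
      rw [pvU_cons_ne rest k "order" "superkingdom" o0 (by decide), pvU_cons_ne rest k "order" "phylum" o1 (by decide), pvU_cons_ne rest k "order" "class" o2 (by decide), pvU_cons_self rest k "order" o3, pvU_cons_ne rest k "order" "family" o4 (by decide), pvU_cons_ne rest k "order" "genus" o5 (by decide), pvU_cons_ne rest k "order" "species" o6 (by decide)]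
      rfl
    by_cases h4 : r = "family"
    · subst h4
      have hp : pvPosDict.get? "family" = some 4 := by decide
      simp only [pvBStep, hp]
      rw [pvU_cons_ne rest k "family" "superkingdom" o0 (by decide), pvU_cons_ne rest k "family" "phylum" o1 (by decide), pvU_cons_ne rest k "family" "class" o2 (by decide), pvU_cons_ne rest k "family" "order" o3 (by decide), pvU_cons_self rest k "family" o4, pvU_cons_ne rest k "family" "genus" o5 (by decide), pvU_cons_ne rest k "family" "species" o6 (by decide)]
      rfl
    by_cases h5 : r = "genus"
    · subst h5
      have hp : pvPosDict.get? "genus" = some 5 := by decide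
      simp only [pvBStep, hp]
      rw [pvU_cons_ne rest k "genus" "superkingdom" o0 (by decide), pvU_cons_ne rest k "genus" "phylum" o1 (by decide), pvU_cons_ne rest k "genus" "class" o2 (by decide), pvU_cons_ne rest k "genus" "order" o3 (by decide), pvU_cons_ne rest k "genus" "family" o4 (by decide), pvU_cons_self rest k "genus" o5, pvU_cons_ne rest k "genus" "species" o6 (by decide)]
      rfl
    by_cases h6 : r = "species"
    · subst h6
      have hp : pvPosDict.get? "species" = some 6 := by decide
      simp only [pvBStep, hp]
      rw [pvU_cons_ne rest k "species" "superkingdom" o0 (by decide), pvU_cons_ne rest k "species" "phylum" o1 (by decide), pvU_cons_ne rest k "species" "class" o2 (by decide), pvU_cons_ne rest k "species" "order" o3 (by decide), pvU_cons_ne rest k "species" "family" o4 (by decide), pvU_cons_ne rest k "species" "genus" o5 (by decide), pvU_cons_self rest k "species" o6]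
      rfl
    · have hp := pvPosDict_none r h0 h1 h2 h3 h4 h5 h6
      simp only [pvBStep, hp]
      rw [pvU_cons_ne rest k r "superkingdom" o0 h0, pvU_cons_ne rest k r "phylum" o1 h1, pvU_cons_ne rest k r "class" o2 h2, pvU_cons_ne rest k r "order" o3 h3, pvU_cons_ne rest k r "family" o4 h4, pvU_cons_ne rest k r "genus" o5 h5, pvU_cons_ne rest k r "species" o6 h6]

theorem pvFirstFold0 (lr : List String) :
    ((PySem.List.enumerate lr).reverse).foldl pvBStep (List.replicate 7 (none : Option Int))
    = [pvU lr 0 "superkingdom" none, pvU lr 0 "phylum" none, pvU lr 0 "class" none, pvU lr 0 "order" none,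
       pvU lr 0 "family" none, pvU lr 0 "genus" none, pvU lr 0 "species" none] := by
  rw [List.foldl_reverse]
  have h := pvFirstFold lr 0 none none none none none none none
  simpa using h

theorem pvAG_eq_pvFmtB (lr lin : List String) (nameD : PySem.Dict String String) (scores : Option (List String)) (r : String) (j : Nat) (hidx : PySem.List.index? lr r = some j) :
    pvAG lr lin nameD scores r = pvFmtB nameD scores lin (j : Int) := by
  have hlit2 : ("*: " : String) = "*" ++ ": " := by decide
  have hstar : ∀ n s : String, n ++ "*: " ++ s = n ++ "*" ++ ": " ++ s := by
    intro n s
    simp [hlit2, String.append_assoc]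
  cases scores with
  | none =>
    simp only [pvAG, pvFmtB, hidx, Option.getD_some]
    by_cases h : PySem.Str.isIn "*" ((PySem.List.pyGet? lin (j : Int)).getD "") = true
    · simp only [h, if_true]
    · have hb : PySem.Str.isIn "*" ((PySem.List.pyGet? lin (j : Int)).getD "") = false := by
        simpa using h
      have hss := pvStripStar_of_not_isIn _ hb
      simp only [hb, Bool.false_eq_true, if_false]
      rw [hss]
  | some sc =>
    simp only [pvAG, pvFmtB, hidx, Option.getD_some]
    by_cases h : PySem.Str.isIn "*" ((PySem.List.pyGet? lin (j : Int)).getD "") = true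
    · simp only [h, if_true]
      exact hstar _ _
    · have hb : PySem.Str.isIn "*" ((PySem.List.pyGet? lin (j : Int)).getD "") = false := by
        simpa using h
      have hss := pvStripStar_of_not_isIn _ hb
      simp only [hb, Bool.false_eq_true, if_false]
      rw [hss]

theorem pvNameOf_U (lr lin : List String) (nameD : PySem.Dict String String) (scores : Option (List String)) (r : String) :
    pvNameOf nameD scores lin (pvU lr 0 r none)
    = if r ∈ lr then pvAG lr lin nameD scores r else "no support" := by
  unfold pvU
  cases hidx : PySem.List.index? lr r with
  | none =>
    have hnm : r ∉ lr := (PySem.List.index?_eq_none_iff _ _).mp hidx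
    simp [pvNameOf, hnm]
  | some i =>
    have hm : r ∈ lr := by rw [← PySem.List.index?_isSome_iff, hidx]; rfl
    have := pvAG_eq_pvFmtB lr lin nameD scores r i hidx
    simp only [pvNameOf, hm, if_true, this]
    norm_num

-- B's output loop as a function of the 7 slot values
def pvBackStep (slots : List String) (st : List String × Bool) (j : Int) : List String × Bool :=
  let name := slots.getD j.toNat ""
  if name ≠ "no support" then (st.1 ++ [name], true)
  else (st.1 ++ [if st.2 then "NA" else "no support"], st.2)

def pvBack (slots : List String) : List String :=
  (((PySem.List.pyRange 6 (-1) (-1)).foldl (pvBackStep slots) ([], false)).1).reverse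

-- A's two trailing loops = B's single back-to-front pass: helpers and proof
def pvM (x : String) : String := if x = "no support" then "NA" else x
def pvStep0 (st : List String × Bool) (x : String) : List String × Bool :=
  if x ≠ "no support" then (st.1 ++ [x], true)
  else (st.1 ++ [if st.2 then "NA" else "no support"], st.2)
def pvBkA : List String → Bool → List String × Bool
  | [], seen => ([], seen)
  | x :: xs, seen =>
    let hd := if x ≠ "no support" then x else if seen then "NA" else "no support"
    let rest := pvBkA xs (seen || decide (x ≠ "no support"))
    (hd :: rest.1, rest.2)
theorem pvFoldStep0 : ∀ (l acc : List String) (seen : Bool),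
    l.foldl pvStep0 (acc, seen) = (acc ++ (pvBkA l seen).1, (pvBkA l seen).2) := by
  intro l
  induction l with
  | nil => intro acc seen; simp [pvBkA]
  | cons x xs ih =>
    intro acc seen
    by_cases hx : x = "no support"
    · subst hx
      simp [pvStep0, pvBkA, ih]
    · simp [pvStep0, pvBkA, hx, ih]
theorem pvFillPrefix : ∀ (l t : List String),
    (PySem.List.pyRange 0 (l.length : Int) 1).foldl
      (fun arr i => if (PySem.List.pyGet? arr i).getD "" = "no support" then arr.set i.toNat "NA" else arr)
      (l ++ t)
    = l.map pvM ++ t := by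
  intro l
  induction l using List.reverseRecOn with
  | nil =>
    intro t
    rw [PySem.List.pyRange_one_eq_nil (by simp)]
    simp
  | append_singleton l x ih =>
    intro t
    have hlen : (((l ++ [x]).length : Nat) : Int) = (l.length : Int) + 1 := by simp
    rw [hlen, PySem.List.pyRange_one_succ_right (by positivity), List.foldl_append, List.append_assoc, ih ([x] ++ t)]
    simp only [List.foldl_cons, List.foldl_nil]
    have hget : (PySem.List.pyGet? (l.map pvM ++ ([x] ++ t)) ((l.length : Int))).getD "" = x := by
      rw [show ((l.length : Int)) = (((l.map pvM).length : Nat) : Int) by simp]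
      rw [PySem.List.pyGet?_natCast]
      simp
    rw [hget]
    by_cases hx : x = "no support"
    · rw [if_pos hx]
      rw [show ((l.length : Int)).toNat = (l.map pvM).length by simp]
      rw [List.set_append_right _ _ (le_refl _)]
      simp [pvM, hx]
    · rw [if_neg hx]
      simp [pvM, hx]
theorem pvNaFill_eq_pvBack (a b c d e f g : String) :
    pvNaFill [a, b, c, d, e, f, g] = pvBack [a, b, c, d, e, f, g] := by
  have hB : pvBack [a, b, c, d, e, f, g] = ((pvBkA [g, f, e, d, c, b, a] false).1).reverse := by
    rw [pvBack, show PySem.List.pyRange 6 (-1) (-1) = [6, 5, 4, 3, 2, 1, 0] from by decide]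
    rw [show ([(6:Int), 5, 4, 3, 2, 1, 0]).foldl (pvBackStep [a, b, c, d, e, f, g]) (([] : List String), false)
        = ([g, f, e, d, c, b, a]).foldl pvStep0 (([] : List String), false) from rfl]
    rw [pvFoldStep0]
    simp
  rw [hB]
  by_cases h6 : g = "no support"
  · subst h6
    by_cases h5 : f = "no support"
    · subst h5
      by_cases h4 : e = "no support"
      · subst h4
        by_cases h3 : d = "no support"
        · subst h3
          by_cases h2 : c = "no support"
          · subst h2
            by_cases h1 : b = "no support"
            · subst h1
              by_cases h0 : a = "no support"
              · subst h0
                simp [pvNaFill, pvBkA]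
              · simp only [pvNaFill, PySem.List.enumerate_cons, PySem.List.enumerate_nil, List.foldl_cons, List.foldl_nil]
                norm_num [h0]
                simp [pvBkA, h0]
            · simp only [pvNaFill, PySem.List.enumerate_cons, PySem.List.enumerate_nil, List.foldl_cons, List.foldl_nil]
              norm_num [h1]
              have hfill := pvFillPrefix [a] [b, "no support", "no support", "no support", "no support", "no support"]
              norm_num at hfill
              rw [hfill]
              simp [pvBkA, h1, pvM]
          · simp only [pvNaFill, PySem.List.enumerate_cons, PySem.List.enumerate_nil, List.foldl_cons, List.foldl_nil]
            norm_num [h2]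
            have hfill := pvFillPrefix [a, b] [c, "no support", "no support", "no support", "no support"]
            norm_num at hfill
            rw [hfill]
            simp [pvBkA, h2, pvM]
        · simp only [pvNaFill, PySem.List.enumerate_cons, PySem.List.enumerate_nil, List.foldl_cons, List.foldl_nil]
          norm_num [h3]
          have hfill := pvFillPrefix [a, b, c] [d, "no support", "no support", "no support"]
          norm_num at hfill
          rw [hfill]
          simp [pvBkA, h3, pvM]
      · simp only [pvNaFill, PySem.List.enumerate_cons, PySem.List.enumerate_nil, List.foldl_cons, List.foldl_nil]
        norm_num [h4]
        have hfill := pvFillPrefix [a, b, c, d] [e, "no support", "no support"]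
        norm_num at hfill
        rw [hfill]
        simp [pvBkA, h4, pvM]
    · simp only [pvNaFill, PySem.List.enumerate_cons, PySem.List.enumerate_nil, List.foldl_cons, List.foldl_nil]
      norm_num [h5]
      have hfill := pvFillPrefix [a, b, c, d, e] [f, "no support"]
      norm_num at hfill
      rw [hfill]
      simp [pvBkA, h5, pvM]
  · simp only [pvNaFill, PySem.List.enumerate_cons, PySem.List.enumerate_nil, List.foldl_cons, List.foldl_nil]
    norm_num [h6]
    have hfill := pvFillPrefix [a, b, c, d, e, f] [g]
    norm_num at hfill
    rw [hfill]
    simp [pvBkA, h6, pvM]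

-- ===== VERDICT (by name: the statement is the Claim_ definition above) =====
theorem convert_to_official_names_spec : Claim_equal_convert_to_official_names := by
  intro lineage taxid2rank taxid2name scores _ _
  unfold Spec_convert_to_official_names
  simp only [convert_to_official_names, convert_to_official_names_alt]
  rw [pvAfold]
  simp only [pvFirstFold0]
  have hcong :
      (PySem.List.pyRange 6 (-1) (-1)).foldl
        (fun (st : List String × Bool) j =>
          let name := pvNameOf (PySem.Dict.ofList taxid2name) scores lineage
            ([pvU (lineage.map (fun taxid => (PySem.Dict.ofList taxid2rank).getD (pvStripStar taxid) "")) 0 "superkingdom" none,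
              pvU (lineage.map (fun taxid => (PySem.Dict.ofList taxid2rank).getD (pvStripStar taxid) "")) 0 "phylum" none,
              pvU (lineage.map (fun taxid => (PySem.Dict.ofList taxid2rank).getD (pvStripStar taxid) "")) 0 "class" none,
              pvU (lineage.map (fun taxid => (PySem.Dict.ofList taxid2rank).getD (pvStripStar taxid) "")) 0 "order" none,
              pvU (lineage.map (fun taxid => (PySem.Dict.ofList taxid2rank).getD (pvStripStar taxid) "")) 0 "family" none,
              pvU (lineage.map (fun taxid => (PySem.Dict.ofList taxid2rank).getD (pvStripStar taxid) "")) 0 "genus" none,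
              pvU (lineage.map (fun taxid => (PySem.Dict.ofList taxid2rank).getD (pvStripStar taxid) "")) 0 "species" none].getD j.toNat none)
          if name ≠ "no support" then (st.1 ++ [name], true)
          else (st.1 ++ [if st.2 then "NA" else "no support"], st.2))
        ([], false)
      = (PySem.List.pyRange 6 (-1) (-1)).foldl
          (pvBackStep (pvOfficialRanks.map (fun r =>
            if r ∈ lineage.map (fun taxid => (PySem.Dict.ofList taxid2rank).getD (pvStripStar taxid) "")
            then pvAG (lineage.map (fun taxid => (PySem.Dict.ofList taxid2rank).getD (pvStripStar taxid) "")) lineage (PySem.Dict.ofList taxid2name) scores r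
            else "no support")))
          ([], false) := by
    apply PySem.List.foldl_congr_mem
    intro acc j hj
    rw [show PySem.List.pyRange 6 (-1) (-1) = [6, 5, 4, 3, 2, 1, 0] from by decide] at hj
    fin_cases hj <;>
      simp [pvBackStep, pvNameOf_U, pvOfficialRanks]
  rw [hcong]
  rw [show ∀ slots : List String,
        ((PySem.List.pyRange 6 (-1) (-1)).foldl (pvBackStep slots) ([], false)).1.reverse = pvBack slots
      from fun _ => rfl]
  simp only [pvOfficialRanks, List.map_cons, List.map_nil]
  exact pvNaFill_eq_pvBack _ _ _ _ _ _ _
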